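-- pv_equiv track=rewrite | github.com/Yawn-Sean/Daily_CF_Problems | daily_problems/2025/05/0524/personal_submission/cf373b_if.py | f
-- ===== SOURCE A (Python) =====
-- def f(i):
--     if i < 10:
--         return i
--     ans = 0
--     for d in range(1, 100):
--         if 10 ** d <= i:
--             ans += 10 ** (d - 1) * 9 * d
--         else:
--             break
--
--     ans += (i - 10 ** (d - 1) + 1) * d
--     return ans
-- ===== SOURCE B (Python) =====
-- def f(i):
--     if i < 10:
--         return i
--     d, p = 1, 10
--     while p <= i:
--         d, p = d + 1, p * 10
--     return d * (i + 1) - (p - 1) // 9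
-- ===== Notes on version B (the rewrite author's own statement) =====
-- stated objective: simpler
-- what changed: B finds only the digit count d (and p = 10**d) in a multiply-by-10 while loop and returns the single closed-form expression d*(i+1) - (10**d - 1)//9, instead of A's per-digit-length accumulation of 9*10**(d-1)*d bucket terms plus a separate partial-bucket correction.
import Mathlib
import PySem

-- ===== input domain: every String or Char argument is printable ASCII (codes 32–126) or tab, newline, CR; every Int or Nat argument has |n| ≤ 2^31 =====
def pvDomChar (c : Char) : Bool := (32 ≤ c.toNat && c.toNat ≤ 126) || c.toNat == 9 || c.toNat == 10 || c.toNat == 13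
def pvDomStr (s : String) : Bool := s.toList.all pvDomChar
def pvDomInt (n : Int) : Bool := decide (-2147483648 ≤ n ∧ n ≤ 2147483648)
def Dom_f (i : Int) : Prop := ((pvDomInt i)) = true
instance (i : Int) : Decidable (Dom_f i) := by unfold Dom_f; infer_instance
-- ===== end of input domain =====

-- B replaces A's per-digit-length bucket accumulation by a digit-count loop and one closed-form expression; same value, same O(log i) cost (objective: simpler).

-- ===== PORT A =====
-- 'for d in range(1, 100)' with break: d counts up from 1 and the fuel counter
-- (= number of range elements left, 100 - d) makes the recursion structural; if
-- the range is exhausted without break, d is left at 99 (as in Python).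
def fLoopA (i : Int) : Nat → Nat → Int → Nat × Int
  | 0, _, ans => (99, ans)
  | fuel + 1, d, ans =>
    if (10 : Int) ^ d ≤ i then
      fLoopA i fuel (d + 1) (ans + (10 : Int) ^ (d - 1) * 9 * (d : Int))
    else (d, ans)

def f (i : Int) : Int :=
  if i < 10 then i
  else
    let r := fLoopA i 99 1 0
    r.2 + (i - (10 : Int) ^ (r.1 - 1) + 1) * (r.1 : Int)

-- ===== PORT B =====
-- 'while p <= i: d, p = d + 1, p * 10', made structural by a fuel counter; p at
-- least squares every 10 steps, so 100 steps cover every Int i (|i| ≤ 2^31 on Dom).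
def fLoopB (i : Int) : Nat → Int → Int → Int × Int
  | 0, d, p => (d, p)
  | fuel + 1, d, p => if p ≤ i then fLoopB i fuel (d + 1) (p * 10) else (d, p)

def f_alt (i : Int) : Int :=
  if i < 10 then i
  else
    let r := fLoopB i 100 1 10
    r.1 * (i + 1) - PySem.Int.floordiv (r.2 - 1) 9

-- ===== PRECONDITION & SPEC =====
def Spec_f (i : Int) (out : Int) : Prop := out = f_alt i
instance (i : Int) (out : Int) : Decidable (Spec_f i out) := by unfold Spec_f; infer_instance

-- ===== CLAIM (what is proved, stated in full; the proofs are below) =====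
def Claim_equal_f : Prop := ∀ (i : Int), Dom_f i → Spec_f i (f i)

-- ===== LEMMAS AND PROOFS =====

-- repunit with d digits: rep d = (10^d - 1) / 9
def rep : Nat → Int
  | 0 => 0
  | d + 1 => 10 * rep d + 1

theorem nine_mul_rep (d : Nat) : 9 * rep d = 10 ^ d - 1 := by
  induction d with
  | zero => simp [rep]
  | succ d ih => simp only [rep, pow_succ]; linarith

-- A's result from state (d, ans), including the final partial-bucket term
def FA (i : Int) (fuel d : Nat) (a : Int) : Int :=
  (fLoopA i fuel d a).2
    + (i - (10 : Int) ^ ((fLoopA i fuel d a).1 - 1) + 1) * ((fLoopA i fuel d a).1 : Int)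

-- B's result from state (d, p)
def FB (i : Int) (fuel : Nat) (d p : Int) : Int :=
  (fLoopB i fuel d p).1 * (i + 1) - PySem.Int.floordiv ((fLoopB i fuel d p).2 - 1) 9

theorem floordiv_rep (d : Nat) : PySem.Int.floordiv ((10:Int) ^ d - 1) 9 = rep d := by
  rw [← nine_mul_rep, PySem.Int.floordiv_eq_ediv_of_pos (by norm_num)]
  exact Int.mul_ediv_cancel_left _ (by norm_num)

theorem stopped (i : Int) (fa fb d : Nat) (a : Int) (hc : ¬ (10 : Int) ^ d ≤ i) :
    FA i (fa + 1) d a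
      = a + FB i (fb + 1) (d : Int) ((10:Int) ^ d) - ((d : Int) * (10:Int) ^ (d - 1) - rep d) := by
  unfold FA FB
  simp only [fLoopA, fLoopB, if_neg hc]
  rw [floordiv_rep]
  ring

theorem key (i : Int) (k : Nat) : ∀ (d : Nat) (a : Int) (fa fb : Nat), 1 ≤ d → d + k ≤ 99 →
    i < (10:Int) ^ (d + k) → k < fa → k < fb →
    FA i fa d a
      = a + FB i fb (d : Int) ((10:Int) ^ d) - ((d : Int) * (10:Int) ^ (d - 1) - rep d) := by
  induction k with
  | zero =>
    intro d a fa fb h1 h2 h3 hfa hfb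
    obtain ⟨fa', rfl⟩ := Nat.exists_eq_succ_of_ne_zero (by omega : fa ≠ 0)
    obtain ⟨fb', rfl⟩ := Nat.exists_eq_succ_of_ne_zero (by omega : fb ≠ 0)
    exact stopped i fa' fb' d a (by simpa using not_le_of_gt h3)
  | succ k ih =>
    intro d a fa fb h1 h2 h3 hfa hfb
    obtain ⟨fa', rfl⟩ := Nat.exists_eq_succ_of_ne_zero (by omega : fa ≠ 0)
    obtain ⟨fb', rfl⟩ := Nat.exists_eq_succ_of_ne_zero (by omega : fb ≠ 0)
    by_cases hc : (10 : Int) ^ d ≤ i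
    · have hpow : (10:Int) ^ d * 10 = (10:Int) ^ (d + 1) := (pow_succ 10 d).symm
      have hFA : FA i (fa' + 1) d a
          = FA i fa' (d + 1) (a + (10:Int) ^ (d - 1) * 9 * (d:Int)) := by
        unfold FA; simp only [fLoopA, if_pos hc]
      have hFB : FB i (fb' + 1) (d:Int) ((10:Int) ^ d)
          = FB i fb' (((d + 1 : Nat)) : Int) ((10:Int) ^ (d + 1)) := by
        unfold FB; simp only [fLoopB, if_pos hc, hpow]; push_cast; ring_nf
      have ih' := ih (d + 1) (a + (10:Int) ^ (d - 1) * 9 * (d:Int)) fa' fb' (by omega) (by omega)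
        (by rw [show d + 1 + k = d + (k+1) by omega]; exact h3) (by omega) (by omega)
      rw [hFA, ih', ← hFB]
      have hd1 : d + 1 - 1 = d := by omega
      have hten : (10:Int) ^ d = 10 * (10:Int) ^ (d - 1) := by
        rw [← pow_succ']; congr 1; omega
      have hrep : rep (d + 1) = 10 * rep d + 1 := rfl
      have h9 : 9 * rep d = 10 ^ d - 1 := nine_mul_rep d
      rw [hd1, hrep]
      push_cast
      rw [hten] at h9 ⊢
      simp only [Nat.succ_eq_add_one]
      linear_combination h9
    · exact stopped i fa' fb' d a hc

theorem fa_eq (i : Int) (h : ¬ i < 10) : f i = FA i 99 1 0 := by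
  unfold f FA
  rw [if_neg h]

theorem fb_eq (i : Int) (h : ¬ i < 10) : f_alt i = FB i 100 1 10 := by
  unfold f_alt FB
  rw [if_neg h]

-- ===== VERDICT (by name: the statement is the Claim_ definition above) =====
theorem f_spec : Claim_equal_f := by
  intro i hdom
  unfold Spec_f
  by_cases h : i < 10
  · unfold f f_alt; rw [if_pos h, if_pos h]
  · have hi : i ≤ 2147483648 := by
      unfold Dom_f pvDomInt at hdom
      simpa using (of_decide_eq_true hdom).2
    have h3 : i < (10:Int) ^ (1 + 9) := by norm_num; omega
    have hk := key i 9 1 0 99 100 (by norm_num) (by norm_num) h3 (by norm_num) (by norm_num)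
    rw [fa_eq i h, fb_eq i h, hk]
    norm_num [rep]
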